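-- pv_equiv track=rewrite | github.com/rakesh-codeyogi/website-scrapper | src/output.py | _extract_org_name
-- ===== SOURCE A (Python) =====
-- def _extract_org_name(titles: list[str]) -> str:
--     """
--     Extract organization name from page titles.
--
--     Handles common patterns like:
--     - "Home - WHEELS Global Foundation" → "WHEELS Global Foundation"
--     - "About | Company Name" → "Company Name"
--     - "Company Name :: Products" → "Company Name"
--     """
--     if not titles:
--         return "website"
--
--     # Common separators in page titles
--     separators = [' - ', ' | ', ' :: ', ' : ', ' — ', ' – ']
--
--     # Common page type prefixes/suffixes to ignore
--     page_types = {
--         'home', 'about', 'about us', 'contact', 'contact us',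
--         'products', 'services', 'blog', 'news', 'team', 'careers',
--         'faq', 'help', 'support', 'login', 'sign in', 'register'
--     }
--
--     # Try to find common part across multiple titles
--     candidates = []
--
--     for title in titles[:5]:  # Check first 5 pages
--         if not title:
--             continue
--
--         # Split by separators and find the org name part
--         parts = [title]
--         for sep in separators:
--             new_parts = []
--             for part in parts:
--                 new_parts.extend(part.split(sep))
--             parts = new_parts
--
--         # Filter out page type words, keep likely org names
--         for part in parts:
--             part = part.strip()
--             if part.lower() not in page_types and len(part) > 2:
--                 candidates.append(part)
--
--     if not candidates:
--         return titles[0] if titles else "website"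
--
--     # Find the most common candidate (likely the org name)
--     from collections import Counter
--     counts = Counter(candidates)
--     most_common = counts.most_common(1)[0][0]
--
--     return most_common
-- ===== SOURCE B (Python) =====
-- def _extract_org_name(titles: list[str]) -> str:
--     """Extract organization name from page titles (recursive-split / comprehension rewrite)."""
--     if not titles:
--         return "website"
--
--     separators = [' - ', ' | ', ' :: ', ' : ', ' — ', ' – ']
--
--     page_types = {
--         'home', 'about', 'about us', 'contact', 'contact us',
--         'products', 'services', 'blog', 'news', 'team', 'careers',
--         'faq', 'help', 'support', 'login', 'sign in', 'register'
--     }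
--
--     def fragments(text: str, seps: list[str]) -> list[str]:
--         if not seps:
--             return [text]
--         return [frag for chunk in text.split(seps[0]) for frag in fragments(chunk, seps[1:])]
--
--     candidates = [
--         p
--         for title in titles[:5]
--         if title
--         for p in map(str.strip, fragments(title, separators))
--         if p.lower() not in page_types and len(p) > 2
--     ]
--
--     if not candidates:
--         return titles[0]
--
--     counts: dict[str, int] = {}
--     for c in candidates:
--         counts[c] = counts.get(c, 0) + 1
--     return max(counts.items(), key=lambda kv: kv[1])[0]
-- ===== Notes on version B (the rewrite author's own statement) =====
-- stated objective: idiomatic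
-- what changed: Replaces A's three nested imperative split loops with a recursive fragment splitter plus filter/map comprehensions, and Counter(...).most_common(1) with a plain count dict and max(items, key=count).
import Mathlib
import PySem

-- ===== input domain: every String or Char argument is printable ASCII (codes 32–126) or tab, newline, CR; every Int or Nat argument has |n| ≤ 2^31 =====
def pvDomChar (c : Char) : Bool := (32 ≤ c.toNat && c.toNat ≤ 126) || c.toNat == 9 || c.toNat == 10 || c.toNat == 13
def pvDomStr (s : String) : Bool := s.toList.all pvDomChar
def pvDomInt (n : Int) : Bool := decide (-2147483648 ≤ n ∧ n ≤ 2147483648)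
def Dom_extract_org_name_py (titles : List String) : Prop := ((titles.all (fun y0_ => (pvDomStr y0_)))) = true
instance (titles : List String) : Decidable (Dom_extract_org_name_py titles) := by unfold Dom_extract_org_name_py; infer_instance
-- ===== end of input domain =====

-- B replaces A's nested split loops by a recursive fragment splitter with comprehensions
-- and A's Counter.most_common by a plain count dict + max (idiomatic rewrite; same cost).

-- ===== PORT A =====
-- shared module constants (identical literals in both Python sources)
def pvSeparators : List String := [" - ", " | ", " :: ", " : ", " — ", " – "]
def pvPageTypes : List String := PySem.Set.ofList
  ["home", "about", "about us", "contact", "contact us",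
   "products", "services", "blog", "news", "team", "careers",
   "faq", "help", "support", "login", "sign in", "register"]
-- the shared filter line "part.lower() not in page_types and len(part) > 2"
def pvIsCandidate (p : String) : Bool :=
  !(pvPageTypes.contains (PySem.Str.lower p)) && decide (PySem.Str.len p > 2)

def extract_org_name_py (titles : List String) : String :=
  if titles = [] then "website"
  else
    let candidates : List String :=
      (PySem.List.slice titles none (some 5)).foldl (fun cand title =>
        if title = "" then cand
        else
          -- parts = [title]; for sep in separators: new_parts = []; … parts = new_parts
          let parts := pvSeparators.foldl (fun parts sep =>
            parts.foldl (fun newParts part =>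
              newParts ++ ((PySem.Str.split? part sep).getD [part])) []) [title]
          parts.foldl (fun cand part =>
            if pvIsCandidate (PySem.Str.strip part) then
              cand ++ [PySem.Str.strip part]
            else cand) cand) []
    if candidates = [] then (match titles with | [] => "website" | t :: _ => t)
    else
      let counts := PySem.Dict.counter candidates
      -- Counter.most_common(1)[0][0]: the first insertion-order entry of maximal count
      (PySem.List.maxD counts.items (fun kv => kv.2) ("website", 0)).1

-- ===== PORT B =====
def pvFragments : List String → String → List String
  | [], text => [text]
  | sep :: rest, text => ((PySem.Str.split? text sep).getD [text]).flatMap (pvFragments rest)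

def extract_org_name_py_alt (titles : List String) : String :=
  if titles = [] then "website"
  else
    let candidates : List String :=
      ((PySem.List.slice titles none (some 5)).filter (· != "")).flatMap (fun title =>
        ((pvFragments pvSeparators title).map PySem.Str.strip).filter pvIsCandidate)
    if candidates = [] then titles.headD "website"
    else
      let counts : PySem.Dict String Int := candidates.foldl (fun d c => d.insert c (d.getD c 0 + 1)) PySem.Dict.empty
      (PySem.List.maxD counts.items (fun kv => kv.2) ("website", 0)).1

-- ===== PRECONDITION & SPEC =====
def Spec_extract_org_name_py (titles : List String) (out : String) : Prop := out = extract_org_name_py_alt titles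
instance (titles : List String) (out : String) : Decidable (Spec_extract_org_name_py titles out) := by unfold Spec_extract_org_name_py; infer_instance

-- ===== CLAIM (what is proved, stated in full; the proofs are below) =====
def Claim_equal_extract_org_name_py : Prop := ∀ (titles : List String), Dom_extract_org_name_py titles → Spec_extract_org_name_py titles (extract_org_name_py titles)

-- ===== LEMMAS AND PROOFS =====

-- A's sequential per-separator splitting equals B's recursive fragment splitter.
theorem pv_split_loop_eq (seps : List String) (parts : List String) :
    seps.foldl (fun parts sep =>
      parts.foldl (fun newParts part =>
        newParts ++ ((PySem.Str.split? part sep).getD [part])) []) parts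
    = parts.flatMap (pvFragments seps) := by
  induction seps generalizing parts with
  | nil => simp [pvFragments]
  | cons sep rest ih =>
    simp only [List.foldl_cons]
    rw [PySem.List.foldl_append_eq_flatMap, List.nil_append, ih, List.flatMap_assoc]
    rfl

-- A's per-part strip-and-filter loop equals map strip then filter.
theorem pv_collect_eq (parts : List String) (cand : List String) :
    parts.foldl (fun cand part =>
      if pvIsCandidate (PySem.Str.strip part) then
        cand ++ [PySem.Str.strip part]
      else cand) cand
    = cand ++ (parts.map PySem.Str.strip).filter pvIsCandidate := by
  rw [PySem.List.foldl_append_if (fun part => pvIsCandidate (PySem.Str.strip part)) PySem.Str.strip]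
  rw [List.filter_map]
  simp only [Function.comp_def]

-- A's outer candidate loop equals B's filter/flatMap comprehension.
theorem pv_outer_eq (ts : List String) (cand : List String) :
    ts.foldl (fun cand title =>
      if title = "" then cand
      else
        let parts := pvSeparators.foldl (fun parts sep =>
          parts.foldl (fun newParts part =>
            newParts ++ ((PySem.Str.split? part sep).getD [part])) []) [title]
        parts.foldl (fun cand part =>
          if pvIsCandidate (PySem.Str.strip part) then
            cand ++ [PySem.Str.strip part]
          else cand) cand) cand
    = cand ++ (ts.filter (· != "")).flatMap (fun title =>
        ((pvFragments pvSeparators title).map PySem.Str.strip).filter pvIsCandidate) := by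
  induction ts generalizing cand with
  | nil => simp
  | cons t ts ih =>
    by_cases ht : t = ""
    · subst ht; simpa using ih cand
    · simp only [List.foldl_cons, if_neg ht, List.filter_cons]
      have hne : ("" : String) ≠ t := fun h => ht h.symm
      simp only [bne_iff_ne, ne_eq, ht, not_false_eq_true, if_pos]
      rw [ih, pv_split_loop_eq, pv_collect_eq]
      simp [List.flatMap_cons, List.append_assoc]

-- ===== VERDICT (by name: the statement is the Claim_ definition above) =====
theorem extract_org_name_py_spec : Claim_equal_extract_org_name_py := by
  intro titles _
  unfold Spec_extract_org_name_py extract_org_name_py extract_org_name_py_alt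
  by_cases h0 : titles = []
  · simp [h0]
  · simp only [if_neg h0]
    rw [pv_outer_eq, List.nil_append]
    simp only [PySem.Dict.foldl_insert_getD_add_one_eq_counter]
    cases titles with
    | nil => exact absurd rfl h0
    | cons t ts => rfl
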